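-- pv_equiv track=rewrite | github.com/3am-r/pico-morti | apps/fidget_core.py | detect_shake
-- ===== SOURCE A (Python) =====
-- def detect_shake(history):
--     if len(history) < 6:
--         return False
--
--     changes = 0
--     last_dir = None
--
--     for event in history[-6:]:
--         joy = event["joystick"]
--         current_dir = None
--
--         if joy["left"]:
--             current_dir = "l"
--         elif joy["right"]:
--             current_dir = "r"
--
--         if current_dir and current_dir != last_dir:
--             changes += 1
--             last_dir = current_dir
--
--     return changes >= 4
-- ===== SOURCE B (Python) =====
-- def detect_shake(history):
--     if len(history) < 6:
--         return False
--     dirs = []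
--     for event in history[-6:]:
--         joy = event["joystick"]
--         if joy["left"]:
--             dirs.append("l")
--         elif joy["right"]:
--             dirs.append("r")
--     runs = len([d for d, p in zip(dirs, [None] + dirs) if d != p])
--     return runs >= 4
-- ===== Notes on version B (the rewrite author's own statement) =====
-- stated objective: idiomatic
-- what changed: Replaces A's inline state-machine accumulator (changes/last_dir carried through one loop) by an extract-then-group decomposition: first collect the directions of the last 6 events into a list, then count maximal consecutive runs by zipping the list with its shift.
import Mathlib
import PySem

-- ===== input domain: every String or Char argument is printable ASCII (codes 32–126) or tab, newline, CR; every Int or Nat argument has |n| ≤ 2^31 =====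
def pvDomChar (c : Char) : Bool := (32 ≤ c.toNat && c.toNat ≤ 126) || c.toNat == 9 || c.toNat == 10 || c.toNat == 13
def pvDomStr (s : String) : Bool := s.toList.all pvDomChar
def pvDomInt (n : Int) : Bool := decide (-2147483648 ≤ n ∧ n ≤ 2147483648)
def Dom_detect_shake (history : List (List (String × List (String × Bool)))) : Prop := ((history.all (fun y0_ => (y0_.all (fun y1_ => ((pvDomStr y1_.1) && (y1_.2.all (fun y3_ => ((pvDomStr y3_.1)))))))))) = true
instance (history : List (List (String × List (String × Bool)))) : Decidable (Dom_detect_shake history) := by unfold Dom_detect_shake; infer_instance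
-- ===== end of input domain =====

-- B replaces A's inline state-machine accumulator (changes/last_dir) by an extract-then-group
-- decomposition: collect the directions of the last 6 events, then count maximal runs
-- by zipping with the shifted list (objective: more idiomatic decomposition; same cost).
-- ===== PORT A =====
def detect_shake (history : List (List (String × List (String × Bool)))) : Bool :=
  if history.length < 6 then false
  else
    let st := (PySem.List.slice history (some (-6)) none).foldl
      (fun (st : Int × Option String) event =>
        let joy := (event.lookup "joystick").getD []
        let current : Option String :=
          if (joy.lookup "left").getD false then some "l"
          else if (joy.lookup "right").getD false then some "r"
          else none
        match current with
        | some d => if st.2 ≠ some d then (st.1 + 1, some d) else st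
        | none => st) ((0 : Int), (none : Option String))
    decide (st.1 ≥ 4)

-- ===== PORT B =====
def detect_shake_alt (history : List (List (String × List (String × Bool)))) : Bool :=
  if history.length < 6 then false
  else
    let dirs := (PySem.List.slice history (some (-6)) none).foldl
      (fun (acc : List String) event =>
        let joy := (event.lookup "joystick").getD []
        if (joy.lookup "left").getD false then acc ++ ["l"]
        else if (joy.lookup "right").getD false then acc ++ ["r"]
        else acc) []
    let runs := ((dirs.zip ((none : Option String) :: dirs.map some)).filter
      (fun dp => decide (some dp.1 ≠ dp.2))).length
    decide ((runs : Int) ≥ 4)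

-- ===== PRECONDITION & SPEC =====
-- An event of the last 6 is well formed when it has a "joystick" dict containing "left",
-- and (when "left" is false, so Python reads it) also "right".
def pvEventOK (event : List (String × List (String × Bool))) : Bool :=
  match event.lookup "joystick" with
  | none => false
  | some joy =>
    match joy.lookup "left" with
    | none => false
    | some b => b || (joy.lookup "right").isSome

-- Pre_ excludes exactly the inputs on which the Python A raises KeyError: a history of
-- length ≥ 6 whose last 6 events are not all well formed (missing "joystick"/"left"/"right").
def Pre_detect_shake (history : List (List (String × List (String × Bool)))) : Prop :=
  history.length < 6 ∨ ∀ e ∈ history.drop (history.length - 6), pvEventOK e = true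

instance (history : List (List (String × List (String × Bool)))) : Decidable (Pre_detect_shake history) := by
  unfold Pre_detect_shake; infer_instance

def pvWitness_detect_shake : (List (List (String × List (String × Bool)))) :=
  [[("joystick", [("left", true), ("right", false)])],
   [("joystick", [("left", false), ("right", true)])],
   [("joystick", [("left", true), ("right", false)])],
   [("joystick", [("left", false), ("right", true)])],
   [("joystick", [("left", false), ("right", false)])],
   [("joystick", [("left", true), ("right", false)])]]

def Spec_detect_shake (history : List (List (String × List (String × Bool)))) (out : Bool) : Prop := out = detect_shake_alt history
instance (history : List (List (String × List (String × Bool)))) (out : Bool) : Decidable (Spec_detect_shake history out) := by unfold Spec_detect_shake; infer_instance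

-- ===== CLAIM (what is proved, stated in full; the proofs are below) =====
def Claim_equal_detect_shake : Prop := ∀ (history : List (List (String × List (String × Bool)))), Dom_detect_shake history → Pre_detect_shake history → Spec_detect_shake history (detect_shake history)

-- ===== LEMMAS AND PROOFS =====

-- the direction A/B read off one event
def pvDirOf (event : List (String × List (String × Bool))) : Option String :=
  let joy := (event.lookup "joystick").getD []
  if (joy.lookup "left").getD false then some "l"
  else if (joy.lookup "right").getD false then some "r"
  else none

-- run counter on the filtered direction list, seeded with the previous direction
def pvRuns (prev : Option String) (ds : List String) : Nat :=
  ((ds.zip (prev :: ds.map some)).filter (fun dp => decide (some dp.1 ≠ dp.2))).length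

def pvStepB (acc : List String) (event : List (String × List (String × Bool))) : List String :=
  match pvDirOf event with
  | some d => acc ++ [d]
  | none => acc

def pvStepA (st : Int × Option String) (event : List (String × List (String × Bool))) :
    Int × Option String :=
  match pvDirOf event with
  | some d => if st.2 ≠ some d then (st.1 + 1, some d) else st
  | none => st

theorem stepB_eq :
    (fun (acc : List String) (event : List (String × List (String × Bool))) =>
        let joy := (event.lookup "joystick").getD []
        if (joy.lookup "left").getD false then acc ++ ["l"]
        else if (joy.lookup "right").getD false then acc ++ ["r"]
        else acc) = pvStepB := by
  funext acc e
  simp only [pvStepB, pvDirOf]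
  split_ifs <;> rfl

theorem stepA_eq :
    (fun (st : Int × Option String) (event : List (String × List (String × Bool))) =>
        let joy := (event.lookup "joystick").getD []
        let current : Option String :=
          if (joy.lookup "left").getD false then some "l"
          else if (joy.lookup "right").getD false then some "r"
          else none
        match current with
        | some d => if st.2 ≠ some d then (st.1 + 1, some d) else st
        | none => st) = pvStepA := by
  funext st e
  simp only [pvStepA, pvDirOf]

theorem pvRuns_cons (prev : Option String) (d : String) (ds : List String) :
    pvRuns prev (d :: ds) = (if some d ≠ prev then 1 else 0) + pvRuns (some d) ds := by
  simp [pvRuns, List.zip_cons_cons, List.filter]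
  split_ifs with h₁ <;> simp_all <;> omega

theorem dirs_fold_eq (l : List (List (String × List (String × Bool))))
    (acc : List String) :
    l.foldl pvStepB acc = acc ++ l.filterMap pvDirOf := by
  induction l generalizing acc with
  | nil => simp
  | cons e l ih =>
    rcases hd : pvDirOf e with _ | d <;> simp [pvStepB, hd, ih]

theorem countA_eq (l : List (List (String × List (String × Bool))))
    (c : Int) (last : Option String) :
    (l.foldl pvStepA (c, last)).1 = c + pvRuns last (l.filterMap pvDirOf) := by
  induction l generalizing c last with
  | nil => simp [pvRuns]
  | cons e l ih =>
    rcases hd : pvDirOf e with _ | d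
    · simp [pvStepA, hd, ih]
    · simp only [List.foldl_cons, List.filterMap_cons, hd, pvStepA, pvRuns_cons]
      by_cases hl : last = some d
      · simp [hl, ih]
      · have hne : last ≠ some d := hl
        simp only [hne, ne_eq, not_false_iff, if_true, Ne.symm hne, ih]
        push_cast
        omega

-- ===== VERDICT (by name: the statement is the Claim_ definition above) =====
theorem detect_shake_spec : Claim_equal_detect_shake := by
  intro history _ _
  unfold Spec_detect_shake detect_shake detect_shake_alt
  by_cases h : history.length < 6
  · simp only [h, if_true]
  · simp only [h, if_false, stepA_eq, stepB_eq]
    rw [countA_eq, dirs_fold_eq]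
    simp only [List.nil_append, pvRuns]
    rw [decide_eq_decide]
    omega
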